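-- pv_equiv track=rewrite | github.com/WooYongHa/Algorithm | Algo13.py | oneCheck
-- ===== SOURCE A (Python) =====
-- def oneCheck(number):
--     check = 0
--     len = 0
--
--     for i in str(number):
--         len += 1
--         if i == '1':
--             check += 1
--     if check == len:
--         return len
--     else:
--         return -1
-- ===== SOURCE B (Python) =====
-- def oneCheck(number):
--     # Arithmetic repunit test: no string conversion at all.
--     if number <= 0:
--         return -1
--     d = 0
--     n = number
--     while n:
--         if n % 10 != 1:
--             return -1
--         n //= 10
--         d += 1
--     return d
-- ===== Notes on version B (the rewrite author's own statement) =====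
-- stated objective: alternative
-- what changed: Replaces A's string conversion and character loop with pure integer arithmetic: reject non-positive numbers, then peel decimal digits by modulus and integer division, counting them and failing fast on any digit other than one.
import Mathlib
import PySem

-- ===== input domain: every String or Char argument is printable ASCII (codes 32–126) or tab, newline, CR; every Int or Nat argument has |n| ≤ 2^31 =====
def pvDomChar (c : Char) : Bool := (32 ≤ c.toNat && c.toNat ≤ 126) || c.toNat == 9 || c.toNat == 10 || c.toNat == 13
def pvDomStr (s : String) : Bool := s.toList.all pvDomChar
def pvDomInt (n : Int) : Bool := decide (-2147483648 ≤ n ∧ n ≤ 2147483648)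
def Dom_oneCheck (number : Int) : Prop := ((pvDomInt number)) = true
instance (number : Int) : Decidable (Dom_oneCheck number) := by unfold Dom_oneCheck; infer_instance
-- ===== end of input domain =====

-- B replaces A's str(number) conversion and character loop with pure base-10 digit
-- arithmetic (% 10 / // 10 peeling with an early reject); objective: alternative.

-- ===== PORT A =====
-- A: one loop over str(number) keeping two counters (check, len); return len if they agree else -1.
def oneCheck (number : Int) : Int :=
  let r := (PySem.Int.toChars number).foldl
      (fun (st : Int × Int) i =>
        (if i = '1' then st.1 + 1 else st.1, st.2 + 1)) ((0 : Int), (0 : Int))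
  if r.1 = r.2 then r.2 else -1

-- ===== PORT B =====
-- B's while loop: peel digits of a positive Nat, count them, fail fast on a non-1 digit.
def oneCheckLoop : Nat → Nat → Int
  | 0, d => (d : Int)
  | n + 1, d =>
    if (n + 1) % 10 ≠ 1 then -1
    else oneCheckLoop ((n + 1) / 10) (d + 1)
decreasing_by exact Nat.div_lt_self (Nat.succ_pos n) (by omega)

def oneCheck_alt (number : Int) : Int :=
  if number ≤ 0 then -1 else oneCheckLoop number.toNat 0

-- ===== PRECONDITION & SPEC =====
def Spec_oneCheck (number : Int) (out : Int) : Prop := out = oneCheck_alt number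
instance (number : Int) (out : Int) : Decidable (Spec_oneCheck number out) := by unfold Spec_oneCheck; infer_instance

-- ===== CLAIM (what is proved, stated in full; the proofs are below) =====
def Claim_equal_oneCheck : Prop := ∀ (number : Int), Dom_oneCheck number → Spec_oneCheck number (oneCheck number)

-- ===== LEMMAS AND PROOFS =====

-- digits of n, most significant first, as characters (the list Nat.toDigits produces)
def digitsChars (n : Nat) : List Char :=
  if _h : n < 10 then [Nat.digitChar n]
  else digitsChars (n / 10) ++ [Nat.digitChar (n % 10)]
decreasing_by exact Nat.div_lt_self (by omega) (by omega)

lemma toDigitsCore_eq (f : Nat) : ∀ (n : Nat) (ds : List Char), n < f →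
    Nat.toDigitsCore 10 f n ds = digitsChars n ++ ds := by
  induction f with
  | zero => intro n ds h; omega
  | succ f ih =>
    intro n ds h
    rw [Nat.toDigitsCore]
    by_cases h10 : n < 10
    · have : n / 10 = 0 := Nat.div_eq_of_lt h10
      simp [this, digitsChars, h10, Nat.mod_eq_of_lt h10]
    · have hne : ¬ n / 10 = 0 := by omega
      rw [if_neg hne, ih (n / 10) _ (by omega)]
      conv_rhs => rw [digitsChars, dif_neg h10]
      simp

lemma toDigits_eq (n : Nat) : Nat.toDigits 10 n = digitsChars n := by
  rw [Nat.toDigits, toDigitsCore_eq (n + 1) n [] (by omega), List.append_nil]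

lemma digitChar_eq_one_iff (m : Nat) (h : m < 10) : Nat.digitChar m = '1' ↔ m = 1 := by
  interval_cases m <;> simp [Nat.digitChar]

-- B's loop computes: digit count (plus accumulator) if all digits are 1, else -1.
lemma oneCheckLoop_spec (n : Nat) (hn : 0 < n) : ∀ (d : Nat),
    oneCheckLoop n d =
      if (digitsChars n).all (· = '1') then ((d + (digitsChars n).length : Nat) : Int)
      else -1 := by
  induction n using Nat.strong_induction_on with
  | _ n ih =>
    intro d
    obtain ⟨m, rfl⟩ := Nat.exists_eq_succ_of_ne_zero (Nat.pos_iff_ne_zero.mp hn)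
    rw [oneCheckLoop]
    by_cases h10 : m + 1 < 10
    · have hdiv : (m + 1) / 10 = 0 := Nat.div_eq_of_lt h10
      have hmod : (m + 1) % 10 = m + 1 := Nat.mod_eq_of_lt h10
      rw [digitsChars, dif_pos h10]
      by_cases h1 : m + 1 = 1
      · simp [h1, oneCheckLoop, Nat.digitChar]
      · have hd : ¬ Nat.digitChar (m + 1) = '1' :=
          fun hc => h1 ((digitChar_eq_one_iff _ h10).mp hc)
        rw [if_pos (by omega)]
        simp [hd]
    · have hdpos : 0 < (m + 1) / 10 := Nat.div_pos (by omega) (by omega)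
      rw [digitsChars, dif_neg h10]
      by_cases h1 : (m + 1) % 10 = 1
      · rw [if_neg (by omega), ih _ (Nat.div_lt_self (by omega) (by omega)) hdpos]
        have hc : Nat.digitChar ((m + 1) % 10) = '1' := by rw [h1]; rfl
        simp only [List.all_append, List.all_cons, List.all_nil, hc, decide_true,
          Bool.and_true, Bool.and_self, List.length_append, List.length_cons,
          List.length_nil]
        split_ifs <;> [push_cast; rfl] <;> ring
      · have hd : ¬ Nat.digitChar ((m + 1) % 10) = '1' :=
          fun hc => h1 ((digitChar_eq_one_iff _ (Nat.mod_lt _ (by omega))).mp hc)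
        rw [if_pos (by omega)]
        simp [hd]

lemma foldl_pair (cs : List Char) (a b : Int) :
    cs.foldl (fun (st : Int × Int) i =>
        (if i = '1' then st.1 + 1 else st.1, st.2 + 1)) (a, b)
      = (a + (cs.countP (· = '1') : Int), b + cs.length) := by
  induction cs generalizing a b with
  | nil => simp
  | cons c cs ih =>
    simp only [List.foldl_cons, ih, List.countP_cons, List.length_cons, Prod.mk.injEq]
    refine ⟨?_, by push_cast; ring⟩
    by_cases h : c = '1' <;> simp [h] <;> push_cast <;> ring

-- A's guard "count = length" is exactly "all characters are '1'"
lemma count_eq_length_iff (cs : List Char) :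
    ((cs.countP (· = '1') : Int) = cs.length) ↔ cs.all (· = '1') := by
  rw [List.all_eq_true]
  constructor
  · intro h x hx
    have := List.countP_eq_length.mp (by exact_mod_cast h) x hx
    simpa using this
  · intro h
    exact_mod_cast congrArg Nat.cast
      (List.countP_eq_length.mpr (fun x hx => by simpa using h x hx))

-- ===== VERDICT (by name: the statement is the Claim_ definition above) =====
theorem oneCheck_spec : Claim_equal_oneCheck := by
  intro number _
  unfold Spec_oneCheck oneCheck oneCheck_alt
  rw [foldl_pair]
  simp only [zero_add]
  rcases lt_trichotomy number 0 with hneg | rfl | hpos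
  · -- negative: str(number) starts with '-', so the count can never reach the length
    have hts : PySem.Int.toChars number = '-' :: Nat.toDigits 10 number.natAbs := by
      simp [PySem.Int.toChars, hneg]
    have hne : ¬ ((List.countP (fun x => decide (x = '1'))
        (PySem.Int.toChars number) : Int) = (PySem.Int.toChars number).length) := by
      rw [hts]
      intro hc
      have h1 : List.countP (fun x => decide (x = '1'))
          ('-' :: Nat.toDigits 10 number.natAbs)
          = List.countP (fun x => decide (x = '1')) (Nat.toDigits 10 number.natAbs) := by
        simp
      have h2 := List.countP_le_length (l := Nat.toDigits 10 number.natAbs)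
          (p := fun x => decide (x = '1'))
      rw [h1] at hc
      simp only [List.length_cons] at hc
      omega
    rw [if_neg hne, if_pos (le_of_lt hneg)]
  · decide
  · have hts : PySem.Int.toChars number = digitsChars number.toNat := by
      simp [PySem.Int.toChars, not_lt.mpr (le_of_lt hpos), toDigits_eq]
    have hnt : 0 < number.toNat := by omega
    rw [hts, if_neg (not_le.mpr hpos), oneCheckLoop_spec _ hnt 0]
    by_cases hall : (digitsChars number.toNat).all (· = '1')
    · rw [if_pos ((count_eq_length_iff _).mpr hall), if_pos hall, Nat.zero_add]
    · rw [if_neg (fun hc => hall ((count_eq_length_iff _).mp hc)), if_neg hall]
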